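-- pv_equiv track=rewrite | github.com/the-vampiire/hacktoberithms | python/beginner/sum-earnings-sbielenica.py | sum_earning
-- ===== SOURCE A (Python) =====
-- def sum_earning(input):
--
--     streak = 0
--     total_sum = 0
--
--     for num in input:
--         if num >= 0:
--             streak += 1
--             total_sum += num
--         elif num < 0:
--             streak = 0
--             total_sum = 0
--
--     return total_sum
-- ===== SOURCE B (Python) =====
-- def sum_earning(input):
--     total = 0
--     for num in reversed(list(input)):
--         if num < 0:
--             break
--         total += num
--     return total
-- ===== Notes on version B (the rewrite author's own statement) =====
-- stated objective: simpler
-- what changed: Replaces the forward scan with reset state (plus a dead streak counter) by a backward scan that sums elements and breaks at the first negative, since the result is just the sum of the trailing non-negative block.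
import Mathlib
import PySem

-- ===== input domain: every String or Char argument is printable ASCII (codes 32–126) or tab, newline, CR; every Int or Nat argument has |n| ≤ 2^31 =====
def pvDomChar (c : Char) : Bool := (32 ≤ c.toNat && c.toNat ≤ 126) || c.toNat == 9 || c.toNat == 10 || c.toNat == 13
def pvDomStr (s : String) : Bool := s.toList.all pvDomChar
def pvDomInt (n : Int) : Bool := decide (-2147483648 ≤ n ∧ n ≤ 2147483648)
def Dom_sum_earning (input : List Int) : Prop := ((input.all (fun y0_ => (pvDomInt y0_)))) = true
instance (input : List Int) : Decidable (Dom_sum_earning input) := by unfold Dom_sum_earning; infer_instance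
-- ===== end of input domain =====

-- B scans the list backwards, summing until the first negative; A's forward reset loop agrees — equivalence proved below.
-- ===== PORT A =====
-- literal port: fold carrying (streak, total_sum), reset both on a negative
def sum_earning (input : List Int) : Int :=
  (input.foldl
    (fun (s : Int × Int) num =>
      if num ≥ 0 then (s.1 + 1, s.2 + num)
      else if num < 0 then (0, 0)
      else s)
    (0, 0)).2

-- ===== PORT B =====
-- B iterates over the reversed list, breaking at the first negative
def sumUntilNeg : List Int → Int
  | [] => 0
  | n :: t => if n < 0 then 0 else sumUntilNeg t + n

def sum_earning_alt (input : List Int) : Int := sumUntilNeg input.reverse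

-- ===== PRECONDITION & SPEC =====
def Spec_sum_earning (input : List Int) (out : Int) : Prop := out = sum_earning_alt input
instance (input : List Int) (out : Int) : Decidable (Spec_sum_earning input out) := by unfold Spec_sum_earning; infer_instance

-- ===== CLAIM (what is proved, stated in full; the proofs are below) =====
def Claim_equal_sum_earning : Prop := ∀ (input : List Int), Dom_sum_earning input → Spec_sum_earning input (sum_earning input)

-- ===== LEMMAS AND PROOFS =====
theorem sum_earning_eq (input : List Int) : sum_earning input = sum_earning_alt input := by
  induction input using List.reverseRecOn with
  | nil => rfl
  | append_singleton l a ih =>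
    unfold sum_earning sum_earning_alt at *
    rw [List.foldl_append, List.reverse_append]
    simp only [List.foldl_cons, List.foldl_nil, List.reverse_cons, List.singleton_append]
    by_cases h : a ≥ 0
    · have h' : ¬ a < 0 := by omega
      simp [sumUntilNeg, h, h', ih]
    · have h' : a < 0 := by omega
      simp [sumUntilNeg, h, h']

-- ===== VERDICT (by name: the statement is the Claim_ definition above) =====
theorem sum_earning_spec : Claim_equal_sum_earning := by
  intro input _
  unfold Spec_sum_earning
  exact sum_earning_eq input
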